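-- pv_equiv track=rewrite | github.com/Eric-Thomas/Ticket-Helper | Ticket Helper.py | find_old_tag
-- ===== SOURCE A (Python) =====
-- def find_old_tag(description):
-- 	oldTag = ""
-- 	separators = [" ", ",", "\n", "\t", ":", ";", "(", ")", "[", "]", "{", "}", "#", "-", "=", ".", "\\", "/", "<", ">", "\"", "'", "s"]
-- 	try:
-- 		if description.count("old tag") > 2:
-- 			oldTag = "Multiple requests"
-- 		elif "old tag" in description:
-- 			oldTag = ""
-- 			# find index of tag number
-- 			index = description.index("old tag") + 7
-- 			# ignore separators
-- 			while index < len(description) and description[index] in separators: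
-- 				index += 1
-- 			# collect number of tag
-- 			while  index < len(description) and description[index].isdecimal():
-- 				oldTag = oldTag + description[index]
-- 				index += 1
-- 			oldTag = "TAG" + oldTag
-- 		elif "from tag" in description:
-- 			oldTag = ""
-- 			index = description.index("from tag") + 8
-- 			while index < len(description) and description[index] in separators:
-- 				index += 1
-- 			while  index < len(description) and description[index].isdecimal():
-- 				oldTag = oldTag + description[index]
-- 				index += 1
-- 			oldTag = "TAG" + oldTag
-- 	except:
-- 		oldTag = "Error finding tag"
-- 	return oldTag
-- ===== SOURCE B (Python) =====
-- # B: slice/strip-based extraction (find + slicing + lstrip) instead of A's index-stepping while loops.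
-- _SEPS = " ,\n\t:;()[]{}#-=.\\/<>\"'s"
--
-- def _tag_after(description, kw):
-- 	rest = description[description.find(kw) + len(kw):].lstrip(_SEPS)
-- 	return "TAG" + rest[:len(rest) - len(rest.lstrip("0123456789"))]
--
-- def find_old_tag(description):
-- 	if description.count("old tag") > 2:
-- 		return "Multiple requests"
-- 	if "old tag" in description:
-- 		return _tag_after(description, "old tag")
-- 	if "from tag" in description:
-- 		return _tag_after(description, "from tag")
-- 	return ""
-- ===== Notes on version B (the rewrite author's own statement) =====
-- stated objective: idiomatic
-- what changed: Replaced A's index-stepping while loops (separator skip and digit collection with a character accumulator) by a single slice/strip expression: take everything after the keyword, lstrip the separator set, and cut the leading run of digits via the double-lstrip length trick.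
import Mathlib
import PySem

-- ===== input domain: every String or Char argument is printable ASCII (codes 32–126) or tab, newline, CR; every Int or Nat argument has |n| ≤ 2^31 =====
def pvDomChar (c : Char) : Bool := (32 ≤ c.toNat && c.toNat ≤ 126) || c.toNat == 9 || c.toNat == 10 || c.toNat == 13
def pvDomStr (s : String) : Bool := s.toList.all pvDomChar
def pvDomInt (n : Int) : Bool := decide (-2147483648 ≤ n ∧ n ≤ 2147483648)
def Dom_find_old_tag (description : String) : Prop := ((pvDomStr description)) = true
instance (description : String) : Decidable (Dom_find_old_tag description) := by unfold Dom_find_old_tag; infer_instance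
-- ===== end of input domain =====

-- B replaces A's two index-stepping while loops by one slice/lstrip expression; return value only, no side effects.

-- ===== PORT A =====
-- the separators list of A (all one-character strings, so a char list is exact)
def pvSeps : List Char :=
  [' ', ',', '\n', '\t', ':', ';', '(', ')', '[', ']', '{', '}', '#', '-', '=', '.', '\\', '/', '<', '>', '"', '\'', 's']

-- 'while index < len(description) and description[index] in separators: index += 1'
def pvSkip (l : List Char) (i : Nat) : Nat :=
  if h : i < l.length then
    if l[i] ∈ pvSeps then pvSkip l (i + 1) else i
  else i
termination_by l.length - i

-- 'while index < len(description) and description[index].isdecimal(): oldTag += description[index]; index += 1'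
-- (isdecimal = PySem.Chars.isdigit, exact on the ASCII domain)
def pvCollect (l : List Char) (i : Nat) (acc : List Char) : List Char :=
  if h : i < l.length then
    if PySem.Chars.isdigit l[i] then pvCollect l (i + 1) (acc ++ [l[i]]) else acc
  else acc
termination_by l.length - i

-- .index is guarded by 'in', so find ≥ 0 in each branch and .toNat is exact there
def find_old_tag (description : String) : String :=
  let l := description.toList
  if PySem.Chars.count l ("old tag".toList) > 2 then "Multiple requests"
  else if PySem.Chars.isIn ("old tag".toList) l then
    let index := (PySem.Chars.find l ("old tag".toList)).toNat + 7
    String.ofList ("TAG".toList ++ pvCollect l (pvSkip l index) [])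
  else if PySem.Chars.isIn ("from tag".toList) l then
    let index := (PySem.Chars.find l ("from tag".toList)).toNat + 8
    String.ofList ("TAG".toList ++ pvCollect l (pvSkip l index) [])
  else ""

-- ===== PORT B =====
-- description[description.find(kw)+len(kw):].lstrip(seps); then rest[:len(rest)-len(rest.lstrip('0123456789'))]
-- (str.lstrip(chars) is ported by hand as dropWhile (· ∈ chars), which is exact)
def pvTagAfter (l kw : List Char) : List Char :=
  let rest := (PySem.List.slice l (some (PySem.Chars.find l kw + kw.length)) none).dropWhile (· ∈ pvSeps)
  let num := rest.take (rest.length - (rest.dropWhile PySem.Chars.isdigit).length)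
  "TAG".toList ++ num

def find_old_tag_alt (description : String) : String :=
  let l := description.toList
  if PySem.Chars.count l ("old tag".toList) > 2 then "Multiple requests"
  else if PySem.Chars.isIn ("old tag".toList) l then String.ofList (pvTagAfter l ("old tag".toList))
  else if PySem.Chars.isIn ("from tag".toList) l then String.ofList (pvTagAfter l ("from tag".toList))
  else ""

-- ===== PRECONDITION & SPEC =====
def Spec_find_old_tag (description : String) (out : String) : Prop := out = find_old_tag_alt description
instance (description : String) (out : String) : Decidable (Spec_find_old_tag description out) := by unfold Spec_find_old_tag; infer_instance

-- ===== CLAIM =====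
def Claim_equal_find_old_tag : Prop := ∀ (description : String), Dom_find_old_tag description → Spec_find_old_tag description (find_old_tag description)

-- ===== LEMMAS AND PROOFS =====

theorem pvSkip_drop (l : List Char) (i : Nat) :
    l.drop (pvSkip l i) = (l.drop i).dropWhile (· ∈ pvSeps) := by
  induction i using pvSkip.induct (l := l) with
  | case1 i h hsep ih =>
    rw [pvSkip, dif_pos h, if_pos hsep, ih, List.drop_eq_getElem_cons h,
      List.dropWhile_cons_of_pos (by simpa using hsep)]
  | case2 i h hsep =>
    rw [pvSkip, dif_pos h, if_neg hsep, List.drop_eq_getElem_cons h,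
      List.dropWhile_cons_of_neg (by simpa using hsep), ← List.drop_eq_getElem_cons h]
  | case3 i h =>
    rw [pvSkip, dif_neg h]
    rw [List.drop_of_length_le (by omega), List.dropWhile_nil]

theorem pvCollect_eq (l : List Char) (i : Nat) (acc : List Char) :
    pvCollect l i acc = acc ++ (l.drop i).takeWhile PySem.Chars.isdigit := by
  induction i, acc using pvCollect.induct (l := l) with
  | case1 i acc h hd ih =>
    rw [pvCollect, dif_pos h, if_pos hd, ih, List.drop_eq_getElem_cons h,
      List.takeWhile_cons_of_pos hd, List.append_assoc]
    rfl
  | case2 i acc h hd =>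
    rw [pvCollect, dif_pos h, if_neg hd, List.drop_eq_getElem_cons h,
      List.takeWhile_cons_of_neg hd, List.append_nil]
  | case3 i acc h =>
    rw [pvCollect, dif_neg h]
    rw [List.drop_of_length_le (by omega), List.takeWhile_nil, List.append_nil]

theorem take_sub_dropWhile (p : Char → Bool) (rest : List Char) :
    rest.take (rest.length - (rest.dropWhile p).length) = rest.takeWhile p := by
  induction rest with
  | nil => simp
  | cons a t ih =>
    by_cases h : p a
    · have hle : (t.dropWhile p).length ≤ t.length := t.length_dropWhile_le p
      simp only [List.takeWhile_cons_of_pos h, List.dropWhile_cons_of_pos h, List.length_cons]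
      rw [show t.length + 1 - (t.dropWhile p).length = (t.length - (t.dropWhile p).length) + 1
        from by omega, List.take_succ_cons, ih]
    · simp [List.takeWhile_cons_of_neg h, List.dropWhile_cons_of_neg h]

theorem extract_eq (l kw : List Char) (hfind : 0 ≤ PySem.Chars.find l kw) :
    "TAG".toList ++ pvCollect l (pvSkip l ((PySem.Chars.find l kw).toNat + kw.length)) []
      = pvTagAfter l kw := by
  have hto : (PySem.Chars.find l kw + (kw.length : Int)).toNat
      = (PySem.Chars.find l kw).toNat + kw.length := by omega
  simp only [pvTagAfter]
  rw [PySem.List.slice_from _ (by omega), hto, take_sub_dropWhile, pvCollect_eq,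
    List.nil_append, pvSkip_drop]

-- ===== VERDICT =====
theorem find_old_tag_spec : Claim_equal_find_old_tag := by
  intro description _
  show find_old_tag description = find_old_tag_alt description
  simp only [find_old_tag, find_old_tag_alt]
  split_ifs with h1 h2 h3
  · rfl
  · rw [show (7 : Nat) = ("old tag".toList).length from rfl,
      extract_eq _ _ ((PySem.Chars.find_nonneg_iff _ _).mpr ((PySem.Chars.isIn_iff_infix _ _).mp h2))]
  · rw [show (8 : Nat) = ("from tag".toList).length from rfl,
      extract_eq _ _ ((PySem.Chars.find_nonneg_iff _ _).mpr ((PySem.Chars.isIn_iff_infix _ _).mp h3))]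
  · rfl
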